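-- pv_equiv track=rewrite | github.com/kevin-ch-day/ScytaleDroid | scytaledroid/StaticAnalysis/engine/strings.py | _host_risk_tag
-- ===== SOURCE A (Python) =====
-- _INTERNAL_HOST_SUFFIXES = {
--     "corp",
--     "internal",
--     "lan",
--     "local",
--     "intra",
-- }
--
-- def _host_risk_tag(host: str | None) -> str | None:
--     if not host:
--         return None
--     lowered = host.lower()
--     if lowered in {"localhost", "127.0.0.1", "::1"}:
--         return "internal_domain"
--     for suffix in _INTERNAL_HOST_SUFFIXES:
--         if lowered.endswith(f".{suffix}") or lowered == suffix:
--             return "internal_domain"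
--     return "prod_domain"
-- ===== SOURCE B (Python) =====
-- _INTERNAL_HOST_SUFFIXES = {
--     "corp",
--     "internal",
--     "lan",
--     "local",
--     "intra",
-- }
--
-- def _host_risk_tag(host):
--     if not host:
--         return None
--     lowered = host.lower()
--     if lowered in {"localhost", "127.0.0.1", "::1"}:
--         return "internal_domain"
--     label = lowered.rsplit(".", 1)[-1]
--     return "internal_domain" if label in _INTERNAL_HOST_SUFFIXES else "prod_domain"
-- ===== Notes on version B (the rewrite author's own statement) =====
-- stated objective: simpler
-- what changed: B replaces the per-suffix endswith/equality scan by extracting the final dot-separated label once (rsplit) and doing a single set-membership test.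
import Mathlib
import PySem

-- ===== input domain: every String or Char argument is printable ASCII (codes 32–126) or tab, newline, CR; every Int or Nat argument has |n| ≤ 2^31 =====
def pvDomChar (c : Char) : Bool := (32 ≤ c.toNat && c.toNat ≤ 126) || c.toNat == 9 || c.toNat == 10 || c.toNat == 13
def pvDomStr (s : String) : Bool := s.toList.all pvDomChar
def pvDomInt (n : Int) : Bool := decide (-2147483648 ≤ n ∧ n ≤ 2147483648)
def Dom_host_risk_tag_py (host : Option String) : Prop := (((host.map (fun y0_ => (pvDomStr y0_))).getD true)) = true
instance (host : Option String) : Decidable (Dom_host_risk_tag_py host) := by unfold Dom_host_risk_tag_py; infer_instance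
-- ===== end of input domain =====

-- B replaces A's per-suffix endswith/equality scan by extracting the final dot-separated
-- label once and doing a single membership test (objective: simpler).


-- ===== PORT A =====
-- the module constant _INTERNAL_HOST_SUFFIXES (a set of string literals; iteration
-- order does not affect A's result, so it is ported as a list)
def pvInternalSuffixes : List String := ["corp", "internal", "lan", "local", "intra"]

def host_risk_tag_py (host : Option String) : Option String :=
  match host with
  | none => none
  | some h =>
    if h = "" then none          -- `if not host` on a string: falsy iff empty
    else
      let lowered := PySem.Str.lower h
      if lowered = "localhost" ∨ lowered = "127.0.0.1" ∨ lowered = "::1" then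
        some "internal_domain"
      else if pvInternalSuffixes.any
          (fun suffix => PySem.Str.endswith lowered ("." ++ suffix) || lowered == suffix) then
        some "internal_domain"   -- the for-loop returning on the first hit
      else
        some "prod_domain"

-- ===== PORT B =====
-- hand port of `lowered.rsplit(".", 1)[-1]`: the segment after the last '.'
-- (exact: with maxsplit=1 the last piece is everything after the last separator,
-- or the whole string if no '.' occurs)
def pvNotDot (c : Char) : Bool := c ≠ '.'

def pvLastLabel (l : List Char) : List Char :=
  (l.reverse.takeWhile pvNotDot).reverse

def host_risk_tag_py_alt (host : Option String) : Option String :=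
  match host with
  | none => none
  | some h =>
    if h = "" then none
    else
      let lowered := PySem.Str.lower h
      if lowered = "localhost" ∨ lowered = "127.0.0.1" ∨ lowered = "::1" then
        some "internal_domain"
      else
        let label := String.ofList (pvLastLabel lowered.toList)
        if ["corp", "internal", "lan", "local", "intra"].contains label then
          some "internal_domain"
        else
          some "prod_domain"

-- ===== PRECONDITION & SPEC =====
def Spec_host_risk_tag_py (host : Option String) (out : Option String) : Prop := out = host_risk_tag_py_alt host
instance (host : Option String) (out : Option String) : Decidable (Spec_host_risk_tag_py host out) := by unfold Spec_host_risk_tag_py; infer_instance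

-- ===== CLAIM (what is proved, stated in full; the proofs are below) =====
def Claim_equal_host_risk_tag_py : Prop := ∀ (host : Option String), Dom_host_risk_tag_py host → Spec_host_risk_tag_py host (host_risk_tag_py host)

-- ===== LEMMAS AND PROOFS =====

-- core: for a dot-free ρ, the maximal dot-free prefix of R equals ρ iff
-- ρ followed by '.' is a prefix of R, or R is exactly ρ
theorem takeWhile_eq_iff (ρ : List Char) (hρ : '.' ∉ ρ) :
    ∀ R : List Char,
      (R.takeWhile pvNotDot = ρ ↔ ((ρ ++ ['.']) <+: R ∨ R = ρ)) := by
  induction ρ with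
  | nil =>
    intro R
    cases R with
    | nil => simp
    | cons b R' =>
      by_cases hb : b = '.'
      · subst hb
        have h1 : pvNotDot '.' = false := rfl
        simp [List.takeWhile_cons, h1, List.cons_prefix_cons]
      · have h1 : pvNotDot b = true := by simp [pvNotDot, hb]
        have hb' : ¬ ('.' = b) := fun h => hb h.symm
        simp [List.takeWhile_cons, h1, List.cons_prefix_cons, hb']
  | cons a ρ' ih =>
    have ha : a ≠ '.' := fun h => hρ (h ▸ List.mem_cons_self)
    have hρ' : '.' ∉ ρ' := fun h => hρ (List.mem_cons_of_mem _ h)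
    intro R
    cases R with
    | nil => simp
    | cons b R' =>
      by_cases hb : b = '.'
      · subst hb
        have h1 : pvNotDot '.' = false := rfl
        have ha'' : ¬ ('.' = a) := fun h => ha h.symm
        simp [List.takeWhile_cons, h1, List.cons_prefix_cons, ha'']
        exact fun h => absurd h ha
      · have h1 : pvNotDot b = true := by simp [pvNotDot, hb]
        by_cases hba : b = a
        · subst hba
          simp [List.takeWhile_cons, h1, List.cons_prefix_cons, ih hρ' R']
        · have hab : ¬ (a = b) := fun h => hba h.symm
          simp [List.takeWhile_cons, h1, List.cons_prefix_cons, hab]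
          intro h
          exact absurd h hba

-- per-suffix: A's test (endswith "."++s ∨ lowered = s) coincides with
-- "the last label of lowered is s", for dot-free s
theorem hit_iff (lowered : String) (s : String) (hs : '.' ∉ s.toList) :
    ((PySem.Str.endswith lowered ("." ++ s) = true ∨ (lowered == s) = true)
      ↔ String.ofList (pvLastLabel lowered.toList) = s) := by
  have hmk : String.ofList (pvLastLabel lowered.toList) = s
      ↔ pvLastLabel lowered.toList = s.toList := by
    constructor
    · intro h; simpa using congrArg String.toList h
    · intro h; simpa using congrArg String.ofList h
  have hrev : pvLastLabel lowered.toList = s.toList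
      ↔ lowered.toList.reverse.takeWhile pvNotDot = s.toList.reverse := by
    unfold pvLastLabel
    constructor
    · intro h; simpa using congrArg List.reverse h
    · intro h; simpa using congrArg List.reverse h
  have hρ : '.' ∉ s.toList.reverse := by simpa using hs
  have hkey := takeWhile_eq_iff s.toList.reverse hρ lowered.toList.reverse
  rw [hmk, hrev, hkey]
  have hends : PySem.Str.endswith lowered ("." ++ s) = true
      ↔ ('.' :: s.toList) <:+ lowered.toList := by
    rw [PySem.Str.endswith_eq]
    rw [show ("." ++ s).toList = '.' :: s.toList by simp]
    exact PySem.Chars.endswith_iff _ _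
  have hsfx : ('.' :: s.toList) <:+ lowered.toList
      ↔ (s.toList.reverse ++ ['.']) <+: lowered.toList.reverse := by
    rw [← List.reverse_prefix]; simp
  have heqs : (lowered == s) = true ↔ lowered.toList.reverse = s.toList.reverse := by
    simp [String.ext_iff]
  simp only [hends, hsfx, heqs]

theorem dotfree_corp : '.' ∉ ("corp" : String).toList := by decide
theorem dotfree_internal : '.' ∉ ("internal" : String).toList := by decide
theorem dotfree_lan : '.' ∉ ("lan" : String).toList := by decide
theorem dotfree_local : '.' ∉ ("local" : String).toList := by decide
theorem dotfree_intra : '.' ∉ ("intra" : String).toList := by decide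

-- the two final conditions are equal booleans
set_option maxHeartbeats 1000000 in
theorem cond_eq (lowered : String) :
    (pvInternalSuffixes.any
        (fun suffix => PySem.Str.endswith lowered ("." ++ suffix) || lowered == suffix))
      = (["corp", "internal", "lan", "local", "intra"].contains
          (String.ofList (pvLastLabel lowered.toList))) := by
  rw [Bool.eq_iff_iff]
  simp only [pvInternalSuffixes, List.any_cons, List.any_nil, Bool.or_eq_true,
    List.contains_eq_mem, decide_eq_true_eq, List.mem_cons, List.not_mem_nil]
  rw [hit_iff lowered "corp" dotfree_corp, hit_iff lowered "internal" dotfree_internal,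
    hit_iff lowered "lan" dotfree_lan, hit_iff lowered "local" dotfree_local,
    hit_iff lowered "intra" dotfree_intra]
  simp only [Bool.false_eq_true, or_false]

-- ===== VERDICT (by name: the statement is the Claim_ definition above) =====
theorem host_risk_tag_py_spec : Claim_equal_host_risk_tag_py := by
  intro host _
  unfold Spec_host_risk_tag_py host_risk_tag_py host_risk_tag_py_alt
  cases host with
  | none => rfl
  | some h =>
    by_cases h0 : h = ""
    · simp [h0]
    · simp only [h0, if_false]
      rw [cond_eq (PySem.Str.lower h)]
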